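-- pv_equiv track=rewrite | github.com/ToJestKrzysio/BookManager | app/books/helpers.py | get_isbn
-- ===== SOURCE A (Python) =====
-- def get_isbn(isbn_list: list[dict]) -> str | None:
--     isbn = {}
--     for value in isbn_list:
--         type_ = value.get("type")
--         identifier = value.get("identifier")
--         if type_ and identifier:
--             isbn[type_] = identifier
--     return isbn.get("ISBN_13", None) or isbn.get("ISBN_10", None)
-- ===== SOURCE B (Python) =====
-- def get_isbn(isbn_list: list[dict]) -> str | None:
--     for target in ("ISBN_13", "ISBN_10"):
--         found = None
--         for value in isbn_list:
--             if value.get("type") == target and value.get("identifier"):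
--                 found = value["identifier"]
--         if found is not None:
--             return found
--     return None
-- ===== Notes on version B (the rewrite author's own statement) =====
-- stated objective: alternative
-- what changed: B drops the dict entirely: for each target in the fixed priority order it scans the list keeping the last entry whose type equals the target with a truthy identifier, returning on the first priority that yields one.
import Mathlib
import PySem

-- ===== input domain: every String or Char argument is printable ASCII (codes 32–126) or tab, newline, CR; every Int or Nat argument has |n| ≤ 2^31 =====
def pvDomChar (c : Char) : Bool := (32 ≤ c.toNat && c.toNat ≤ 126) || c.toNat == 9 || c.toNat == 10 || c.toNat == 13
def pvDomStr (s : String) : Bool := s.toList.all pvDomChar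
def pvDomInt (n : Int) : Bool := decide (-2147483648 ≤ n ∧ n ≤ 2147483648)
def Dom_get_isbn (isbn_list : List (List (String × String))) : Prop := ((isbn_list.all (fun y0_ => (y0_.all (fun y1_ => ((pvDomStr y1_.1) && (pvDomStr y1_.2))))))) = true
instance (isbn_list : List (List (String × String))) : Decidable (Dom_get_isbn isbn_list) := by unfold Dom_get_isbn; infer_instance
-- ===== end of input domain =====

-- B replaces A's dict-building pass by a per-priority scan keeping the last match (alternative decomposition, same cost).

-- ===== PORT A =====
-- loop body of A: value.get("type") / value.get("identifier") are first-match lookups; truthy guard, dict insert (last wins)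
def pvStepA (d : PySem.Dict String String) (value : List (String × String)) : PySem.Dict String String :=
  let type_ := value.lookup "type"
  let identifier := value.lookup "identifier"
  if type_.getD "" ≠ "" ∧ identifier.getD "" ≠ "" then
    d.insert (type_.getD "") (identifier.getD "")
  else d

def get_isbn (isbn_list : List (List (String × String))) : Option String :=
  let isbn := isbn_list.foldl pvStepA PySem.Dict.empty
  let r13 := isbn.get? "ISBN_13"
  -- Python 'x or y': yield x unless x is falsy (None or "")
  if r13.getD "" ≠ "" then r13 else isbn.get? "ISBN_10"

-- ===== PORT B =====
-- inner loop of B: last entry whose type equals target and whose identifier is truthy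
def pvFindLast (isbn_list : List (List (String × String))) (target : String) : Option String :=
  isbn_list.foldl (fun found value =>
    if value.lookup "type" = some target ∧ (value.lookup "identifier").getD "" ≠ "" then
      value.lookup "identifier"
    else found) none

def get_isbn_alt (isbn_list : List (List (String × String))) : Option String :=
  match pvFindLast isbn_list "ISBN_13" with
  | some found => some found
  | none => pvFindLast isbn_list "ISBN_10"

-- ===== PRECONDITION & SPEC =====
def Spec_get_isbn (isbn_list : List (List (String × String))) (out : Option String) : Prop := out = get_isbn_alt isbn_list
instance (isbn_list : List (List (String × String))) (out : Option String) : Decidable (Spec_get_isbn isbn_list out) := by unfold Spec_get_isbn; infer_instance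

-- ===== CLAIM (what is proved, stated in full; the proofs are below) =====
def Claim_equal_get_isbn : Prop := ∀ (isbn_list : List (List (String × String))), Dom_get_isbn isbn_list → Spec_get_isbn isbn_list (get_isbn isbn_list)

-- ===== LEMMAS AND PROOFS =====

-- A's dict, observed at a fixed nonempty key t, is exactly B's last-match scan for t.
theorem foldl_get?_eq_findLast (t : String) (ht : t ≠ "") :
    ∀ (l : List (List (String × String))) (d : PySem.Dict String String),
      (l.foldl pvStepA d).get? t =
        l.foldl (fun found value =>
          if value.lookup "type" = some t ∧ (value.lookup "identifier").getD "" ≠ "" then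
            value.lookup "identifier"
          else found) (d.get? t) := by
  intro l
  induction l with
  | nil => intro d; rfl
  | cons v l ih =>
    intro d
    simp only [List.foldl_cons, ih]
    congr 1
    unfold pvStepA
    by_cases hc : (v.lookup "type").getD "" ≠ "" ∧ (v.lookup "identifier").getD "" ≠ ""
    · rw [if_pos hc]
      by_cases hk : (v.lookup "type").getD "" = t
      · have hty : v.lookup "type" = some t := by
          cases h : v.lookup "type" with
          | none => rw [h] at hk; simp at hk; exact absurd hk ht
          | some s => rw [h] at hk; simp at hk; rw [hk]
        rw [hk, PySem.Dict.get?_insert_self]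
        rw [if_pos ⟨hty, hc.2⟩]
        cases h : v.lookup "identifier" with
        | none => rw [h] at hc; simp at hc
        | some s => simp
      · rw [PySem.Dict.get?_insert_of_ne _ _ (fun h => hk h.symm)]
        have hty : ¬ (v.lookup "type" = some t ∧ (v.lookup "identifier").getD "" ≠ "") := by
          rintro ⟨h1, _⟩; exact hk (by rw [h1]; rfl)
        rw [if_neg hty]
    · rw [if_neg hc]
      have hb : ¬ (v.lookup "type" = some t ∧ (v.lookup "identifier").getD "" ≠ "") := by
        rintro ⟨h1, h2⟩
        exact hc ⟨by rw [h1]; simpa using ht, h2⟩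
      rw [if_neg hb]

-- B's scan never produces the empty string (the truthy guard on identifier).
theorem findLast_ne_some_empty (t : String) (l : List (List (String × String))) :
    pvFindLast l t ≠ some "" := by
  unfold pvFindLast
  suffices h : ∀ (acc : Option String), acc ≠ some "" →
      (l.foldl (fun found value =>
        if value.lookup "type" = some t ∧ (value.lookup "identifier").getD "" ≠ "" then
          value.lookup "identifier"
        else found) acc) ≠ some "" by
    exact h none (by simp)
  induction l with
  | nil => intro acc hacc; exact hacc
  | cons v l ih =>
    intro acc hacc
    simp only [List.foldl_cons]
    apply ih
    by_cases hc : v.lookup "type" = some t ∧ (v.lookup "identifier").getD "" ≠ ""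
    · rw [if_pos hc]
      cases h : v.lookup "identifier" with
      | none => simp
      | some s =>
        rw [h] at hc; simp at hc
        simpa using hc.2
    · rw [if_neg hc]; exact hacc

-- ===== VERDICT (by name: the statement is the Claim_ definition above) =====
theorem get_isbn_spec : Claim_equal_get_isbn := by
  intro l _
  unfold Spec_get_isbn get_isbn get_isbn_alt
  have h13 := foldl_get?_eq_findLast "ISBN_13" (by decide) l PySem.Dict.empty
  have h10 := foldl_get?_eq_findLast "ISBN_10" (by decide) l PySem.Dict.empty
  rw [PySem.Dict.get?_empty] at h13 h10
  simp only [h13, h10]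
  have hne := findLast_ne_some_empty "ISBN_13" l
  unfold pvFindLast at hne ⊢
  cases h : (l.foldl (fun found value =>
      if value.lookup "type" = some "ISBN_13" ∧ (value.lookup "identifier").getD "" ≠ "" then
        value.lookup "identifier"
      else found) none) with
  | none => simp
  | some s =>
    rw [h] at hne
    have hs : s ≠ "" := fun hs => hne (by rw [hs])
    simp [hs]
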